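-- pv_equiv track=rewrite | github.com/tairabiteru/oronyx | oronyx/utils.py | month_step
-- ===== SOURCE A (Python) =====
-- def month_step(step: int, month: int, year: int) -> tuple[int, int]:
--     if step > 0:
--         while step > 0:
--             month += 1
--             if month == 13:
--                 month = 1
--                 year += 1
--             step -= 1
--     elif step < 0:
--         while step < 0:
--             month -= 1
--             if month == 0:
--                 month = 12
--                 year -= 1
--             step += 1
--     return month, year
-- ===== SOURCE B (Python) =====
-- def month_step(step: int, month: int, year: int) -> tuple[int, int]:
--     years, month0 = divmod(month - 1 + step, 12)
--     return month0 + 1, year + years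
-- ===== Notes on version B (the rewrite author's own statement) =====
-- stated objective: simpler
-- what changed: replaces the month-by-month while loop with one closed-form divmod (years, month0 = divmod(month-1+step, 12)); Pre_ excludes inputs whose month walk stays entirely outside the calendar range 1..12 (an invalid month that stays invalid, a corner no one would specify): there A drifts without wrapping while B wraps modularly, both defensible
-- outside the precondition, e.g. on month_step(3, 20, 2000): A returns (23, 2000), B returns (11, 2001); on month_step(-2, 0, 1999): A returns (-2, 1999), B returns (10, 1998)
import Mathlib
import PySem

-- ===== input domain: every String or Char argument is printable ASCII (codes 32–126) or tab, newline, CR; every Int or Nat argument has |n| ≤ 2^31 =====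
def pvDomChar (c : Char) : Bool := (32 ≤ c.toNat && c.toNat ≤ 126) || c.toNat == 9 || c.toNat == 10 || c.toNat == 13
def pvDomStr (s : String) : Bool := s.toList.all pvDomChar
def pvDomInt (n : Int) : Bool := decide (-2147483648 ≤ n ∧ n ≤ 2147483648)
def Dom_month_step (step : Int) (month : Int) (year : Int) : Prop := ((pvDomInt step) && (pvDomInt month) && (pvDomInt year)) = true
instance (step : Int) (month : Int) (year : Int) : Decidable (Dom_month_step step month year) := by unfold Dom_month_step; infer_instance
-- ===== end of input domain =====

-- B replaces A's month-by-month while loop with one closed-form divmod; equality is claimed on Pre_ (month walks that touch the calendar range 1..12).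

-- ===== PORT A =====
-- A's 'while step > 0' loop: step is decremented once per iteration, so it runs step.toNat times.
def upLoop : Nat → Int → Int → Int × Int
  | 0, m, y => (m, y)
  | n + 1, m, y =>
      let m' := m + 1
      if m' = 13 then upLoop n 1 (y + 1) else upLoop n m' y

-- A's 'while step < 0' loop: step is incremented once per iteration, so it runs (-step).toNat times.
def downLoop : Nat → Int → Int → Int × Int
  | 0, m, y => (m, y)
  | n + 1, m, y =>
      let m' := m - 1
      if m' = 0 then downLoop n 12 (y - 1) else downLoop n m' y

def month_step (step : Int) (month : Int) (year : Int) : List Int :=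
  if step > 0 then
    let r := upLoop step.toNat month year
    [r.1, r.2]
  else if step < 0 then
    let r := downLoop (-step).toNat month year
    [r.1, r.2]
  else [month, year]

-- ===== PORT B =====
def month_step_alt (step : Int) (month : Int) (year : Int) : List Int :=
  let years := PySem.Int.floordiv (month - 1 + step) 12
  let month0 := PySem.Int.mod (month - 1 + step) 12
  [month0 + 1, year + years]

-- ===== PRECONDITION & SPEC =====
-- Pre_ excludes inputs whose month walk (from month to month+step) lies entirely outside the
-- calendar range 1..12: such a month is invalid and stays invalid, a corner no one would specify —
-- A drifts without ever wrapping, B wraps modularly, both defensible. On every other input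
-- (all valid months, and invalid months whose walk enters the range) the two agree.
def Pre_month_step (step : Int) (month : Int) (year : Int) : Prop :=
  (month ≤ 12 ∨ month + step ≤ 12) ∧ (1 ≤ month ∨ 1 ≤ month + step)
instance (step : Int) (month : Int) (year : Int) : Decidable (Pre_month_step step month year) := by unfold Pre_month_step; infer_instance

def pvWitness_month_step : Int × Int × Int := (25, 7, 2020)

def Spec_month_step (step : Int) (month : Int) (year : Int) (out : List Int) : Prop := out = month_step_alt step month year
instance (step : Int) (month : Int) (year : Int) (out : List Int) : Decidable (Spec_month_step step month year out) := by unfold Spec_month_step; infer_instance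

-- ===== CLAIM (what is proved, stated in full; the proofs are below) =====
def Claim_equal_month_step : Prop := ∀ (step : Int) (month : Int) (year : Int), Dom_month_step step month year → Pre_month_step step month year → Spec_month_step step month year (month_step step month year)

-- ===== LEMMAS AND PROOFS =====
lemma upLoop_eq (n : Nat) : ∀ m y : Int,
    upLoop n m y =
      if m ≤ 12 ∧ 1 ≤ m + (n : Int) then
        ((m - 1 + (n : Int)) % 12 + 1, y + (m - 1 + (n : Int)) / 12)
      else (m + (n : Int), y) := by
  induction n with
  | zero =>
      intro m y
      simp only [upLoop, Nat.cast_zero, add_zero]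
      split_ifs with h
      · simp only [Prod.mk.injEq]; constructor <;> omega
      · rfl
  | succ n ih =>
      intro m y
      by_cases h : m + 1 = 13
      · have hm : m = 12 := by omega
        subst hm
        simp only [upLoop, ih]
        split_ifs with h1 h2 h2 <;> simp only [Prod.mk.injEq] <;> omega
      · simp only [upLoop, if_neg h, ih]
        split_ifs with h1 h2 h2 <;> simp only [Prod.mk.injEq, and_true] <;> omega

lemma downLoop_eq (n : Nat) : ∀ m y : Int,
    downLoop n m y =
      if 1 ≤ m ∧ m - (n : Int) ≤ 12 then
        ((m - 1 - (n : Int)) % 12 + 1, y + (m - 1 - (n : Int)) / 12)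
      else (m - (n : Int), y) := by
  induction n with
  | zero =>
      intro m y
      simp only [downLoop, Nat.cast_zero, sub_zero]
      split_ifs with h
      · simp only [Prod.mk.injEq]; constructor <;> omega
      · rfl
  | succ n ih =>
      intro m y
      by_cases h : m - 1 = 0
      · have hm : m = 1 := by omega
        subst hm
        simp only [downLoop, ih]
        split_ifs with h1 h2 h2 <;> simp only [Prod.mk.injEq] <;> omega
      · simp only [downLoop, if_neg h, ih]
        split_ifs with h1 h2 h2 <;> simp only [Prod.mk.injEq, and_true] <;> omega

lemma pymod12 (a : Int) : PySem.Int.mod a 12 = a % 12 :=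
  PySem.Int.mod_eq_emod_of_pos (by norm_num)

lemma pydiv12 (a : Int) : PySem.Int.floordiv a 12 = a / 12 :=
  PySem.Int.floordiv_eq_ediv_of_pos (by norm_num)

-- ===== VERDICT (by name: the statement is the Claim_ definition above) =====
theorem month_step_spec : Claim_equal_month_step := by
  unfold Claim_equal_month_step
  intro step month year _ hpre
  obtain ⟨hlo, hhi⟩ := hpre
  unfold Spec_month_step month_step month_step_alt
  rw [pymod12, pydiv12]
  rcases lt_trichotomy step 0 with hs | hs | hs
  · have hgt : ¬ step > 0 := by omega
    have hn : ((-step).toNat : Int) = -step := Int.toNat_of_nonneg (by omega)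
    simp only [hgt, if_false, hs, if_true, downLoop_eq, hn]
    rw [if_pos (by constructor <;> omega)]
    simp only [List.cons.injEq, and_true]
    constructor <;> omega
  · subst hs
    simp only [lt_irrefl, if_false, add_zero]
    have hm : (month - 1) % 12 = month - 1 := by omega
    have hd : (month - 1) / 12 = 0 := by omega
    simp only [hm, hd, List.cons.injEq, and_true]
    constructor <;> omega
  · have hn : (step.toNat : Int) = step := Int.toNat_of_nonneg (by omega)
    simp only [hs, if_true, upLoop_eq, hn]
    rw [if_pos (by constructor <;> omega)]
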